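-- pv_equiv track=rewrite | github.com/a104270/PL2025-A104270 | TPC1/tpc1.py | on_off_sum
-- ===== SOURCE A (Python) =====
-- def on_off_sum(text):
--     """
--     Explicação do código:
--
--     Função on_off_sum(text):
--     - Recebe um texto como entrada para processar
--     - Utiliza variáveis de controle:
--       * results: lista para armazenar as somas parciais
--       * current_sum: guarda o valor da soma atual
--       * is_active: controla se a soma está ativa ou suspensa
--       * current_number: armazena o número sendo construído dígito a dígito
--
--     Lógica de processamento:
--     1. Percorre o texto caractere por caractere
--     2. Identifica comandos "On" e "Off"
--        - "Off" interrompe a soma atual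
--        - "On" retoma a soma
--     3. Constrói numeros dígito por dígito
--     4. Adiciona números à soma quando está ativo
--     5. Quando encontra "=", adiciona a soma atual à lista de resultados
--     6. Continua a acumular a soma entre os sinais de "="
--     """
--
--     results = []
--     current_sum = 0
--     is_active = True
--     current_number = ''
--
--     i = 0
--     while i < len(text):
--         # Check for On/Off commands
--         if i + 1 < len(text):
--             rest_of_text = text[i:].lower()
--             if rest_of_text.startswith('off'):
--                 if current_number and is_active:
--                     current_sum += int(current_number)
--                 current_number = ''
--                 is_active = False
--                 i += 3
--                 continue
--             elif rest_of_text.startswith('on'):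
--                 if current_number and is_active:
--                     current_sum += int(current_number)
--                 current_number = ''
--                 is_active = True
--                 i += 2
--                 continue
--
--         # Process current character
--         if text[i].isdigit():
--             current_number += text[i]
--         else:
--             # Add number to sum if we have one and is active
--             if current_number and is_active:
--                 current_sum += int(current_number)
--             current_number = ''
--
--             # Check for equals sign
--             if text[i] == '=':
--                 results.append(current_sum)
--
--         i += 1
--
--     # Handle any remaining number
--     if current_number and is_active:
--         current_sum += int(current_number)
--         results.append(current_sum)
--     return results
-- ===== SOURCE B (Python) =====
-- import re
--
-- _TOKEN = re.compile(r'[Oo][Ff][Ff]|[Oo][Nn]|[0-9]+|=|[\s\S]')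
--
--
-- def on_off_sum(text):
--     # Lex the whole text once, then evaluate the token stream.
--     tokens = _TOKEN.findall(text)
--     results = []
--     current_sum = 0
--     active = True
--     for tok in tokens:
--         low = tok.lower()
--         if low == 'off':
--             active = False
--         elif low == 'on':
--             active = True
--         elif tok[0].isdigit():
--             if active:
--                 current_sum += int(tok)
--         elif tok == '=':
--             results.append(current_sum)
--     if tokens and tokens[-1][0].isdigit() and active:
--         results.append(current_sum)
--     return results
-- ===== Notes on version B (the rewrite author's own statement) =====
-- stated objective: faster
-- what changed: A walks the text index by index, lowercasing the whole remaining suffix at every position and building numbers digit by digit; B tokenizes the text once with a single regex scan (OFF | ON | digit-run | '=' | other) and then folds over the token list, appending the trailing sum when the last token is a number.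
import Mathlib
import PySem

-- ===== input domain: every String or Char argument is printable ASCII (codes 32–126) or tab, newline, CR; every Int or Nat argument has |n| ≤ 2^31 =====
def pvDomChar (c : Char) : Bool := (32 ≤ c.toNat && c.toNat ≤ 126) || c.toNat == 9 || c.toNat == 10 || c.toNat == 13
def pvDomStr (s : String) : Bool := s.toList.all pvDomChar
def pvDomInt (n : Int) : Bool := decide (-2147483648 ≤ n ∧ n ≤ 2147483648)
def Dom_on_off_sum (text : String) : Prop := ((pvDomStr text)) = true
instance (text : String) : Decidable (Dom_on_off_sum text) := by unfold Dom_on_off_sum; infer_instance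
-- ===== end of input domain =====

-- B replaces A's char-by-char index walk (which lowercases the whole remaining suffix at
-- every position) with a single lex-then-evaluate pass over a token list; objective: faster.

-- int(s) on a nonempty string of ASCII digits (exact there; both programs only apply it to such strings)
def pvIntOfDigits (cs : List Char) : Int :=
  cs.foldl (fun a c => 10 * a + ((c.toNat : Int) - 48)) 0

-- ===== PORT A =====
-- A's while loop over text[i:], state (results, current_sum, is_active, current_number)
def onOffLoopA : List Char → List Int → Int → Bool → List Char → List Int
  | [], results, currentSum, isActive, currentNumber =>
      -- handle any remaining number
      if currentNumber ≠ [] ∧ isActive then results ++ [currentSum + pvIntOfDigits currentNumber]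
      else results
  | c :: rest, results, currentSum, isActive, currentNumber =>
      -- `i + 1 < len(text)` is `rest ≠ []`; rest_of_text = text[i:].lower()
      if rest ≠ [] ∧ PySem.Chars.startswith (PySem.Chars.lower (c :: rest)) ['o','f','f'] then
        onOffLoopA (rest.drop 2)
          results
          (if currentNumber ≠ [] ∧ isActive then currentSum + pvIntOfDigits currentNumber else currentSum)
          false []
      else if rest ≠ [] ∧ PySem.Chars.startswith (PySem.Chars.lower (c :: rest)) ['o','n'] then
        onOffLoopA (rest.drop 1)
          results
          (if currentNumber ≠ [] ∧ isActive then currentSum + pvIntOfDigits currentNumber else currentSum)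
          true []
      else if PySem.Chars.isdigit c then
        onOffLoopA rest results currentSum isActive (currentNumber ++ [c])
      else
        let currentSum' := if currentNumber ≠ [] ∧ isActive then currentSum + pvIntOfDigits currentNumber else currentSum
        let results' := if c = '=' then results ++ [currentSum'] else results
        onOffLoopA rest results' currentSum' isActive []
  termination_by cs => cs.length
  decreasing_by
    all_goals simp

def on_off_sum (text : String) : List Int :=
  onOffLoopA text.toList [] 0 true []

-- ===== PORT B =====
inductive PvTok where
  | off : PvTok
  | on : PvTok
  | num : List Char → PvTok
  | eq : PvTok
  | other : PvTok
deriving DecidableEq, Repr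

-- regex alternative [Oo][Ff][Ff]
def pvIsOff3 : List Char → Bool
  | c0 :: c1 :: c2 :: _ =>
      PySem.Chars.lowerChar c0 == 'o' && PySem.Chars.lowerChar c1 == 'f' && PySem.Chars.lowerChar c2 == 'f'
  | _ => false

-- regex alternative [Oo][Nn]
def pvIsOn2 : List Char → Bool
  | c0 :: c1 :: _ => PySem.Chars.lowerChar c0 == 'o' && PySem.Chars.lowerChar c1 == 'n'
  | _ => false

-- _TOKEN.findall: ordered alternatives OFF | ON | digit-run | '=' | any char
def pvTokenize : List Char → List PvTok
  | [] => []
  | c :: rest =>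
      if pvIsOff3 (c :: rest) then .off :: pvTokenize (rest.drop 2)
      else if pvIsOn2 (c :: rest) then .on :: pvTokenize (rest.drop 1)
      else if PySem.Chars.isdigit c then
        .num (c :: rest.takeWhile PySem.Chars.isdigit) :: pvTokenize (rest.dropWhile PySem.Chars.isdigit)
      else if c = '=' then .eq :: pvTokenize rest
      else .other :: pvTokenize rest
  termination_by cs => cs.length
  decreasing_by
    all_goals simp
    all_goals first
      | omega
      | exact List.length_dropWhile_le _ _

-- the fold over the token list
def pvRunTok : List PvTok → List Int → Int → Bool → List Int × Int × Bool
  | [], results, s, a => (results, s, a)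
  | .off :: ts, results, s, _ => pvRunTok ts results s false
  | .on :: ts, results, s, _ => pvRunTok ts results s true
  | .num ds :: ts, results, s, a => pvRunTok ts results (if a then s + pvIntOfDigits ds else s) a
  | .eq :: ts, results, s, a => pvRunTok ts (results ++ [s]) s a
  | .other :: ts, results, s, a => pvRunTok ts results s a

def pvLastIsNum (ts : List PvTok) : Bool :=
  match ts.getLast? with
  | some (.num _) => true
  | _ => false

def on_off_sum_alt (text : String) : List Int :=
  let toks := pvTokenize text.toList
  match pvRunTok toks [] 0 true with
  | (results, s, a) => if pvLastIsNum toks && a then results ++ [s] else results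

-- ===== PRECONDITION & SPEC =====
def Spec_on_off_sum (text : String) (out : List Int) : Prop := out = on_off_sum_alt text
instance (text : String) (out : List Int) : Decidable (Spec_on_off_sum text out) := by unfold Spec_on_off_sum; infer_instance

-- ===== CLAIM (what is proved, stated in full; the proofs are below) =====
def Claim_equal_on_off_sum : Prop := ∀ (text : String), Dom_on_off_sum text → Spec_on_off_sum text (on_off_sum text)

-- ===== LEMMAS AND PROOFS =====

-- proof-side wrapper for B's evaluation with open accumulator state
def pvRunB (ts : List PvTok) (results : List Int) (s : Int) (a : Bool) : List Int :=
  match pvRunTok ts results s a with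
  | (results', s', a') => if pvLastIsNum ts && a' then results' ++ [s'] else results'

theorem alt_eq_runB (text : String) :
    on_off_sum_alt text = pvRunB (pvTokenize text.toList) [] 0 true := rfl

theorem lowerChar_digit {c : Char} (h : PySem.Chars.isdigit c = true) :
    PySem.Chars.lowerChar c = c := by
  simp [PySem.Chars.isdigit] at h
  have hup : PySem.Chars.isupper c = false := by
    simp [PySem.Chars.isupper]
    intro hA
    exact absurd (lt_of_lt_of_le (by decide : ('9' : Char) < 'A') hA) (not_lt.mpr h.2)
  simp [PySem.Chars.lowerChar, hup]

theorem off_cond_iff (c : Char) (rest : List Char) :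
    (rest ≠ [] ∧ PySem.Chars.startswith (PySem.Chars.lower (c :: rest)) ['o','f','f']) ↔
      pvIsOff3 (c :: rest) = true := by
  match rest with
  | [] => simp [PySem.Chars.startswith, PySem.Chars.lower, pvIsOff3, List.isPrefixOf]
  | [c1] => simp [PySem.Chars.startswith, PySem.Chars.lower, pvIsOff3, List.isPrefixOf]
  | c1 :: c2 :: r =>
    simp [PySem.Chars.startswith, PySem.Chars.lower, pvIsOff3, List.isPrefixOf]
    tauto

theorem on_cond_iff (c : Char) (rest : List Char) :
    (rest ≠ [] ∧ PySem.Chars.startswith (PySem.Chars.lower (c :: rest)) ['o','n']) ↔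
      pvIsOn2 (c :: rest) = true := by
  match rest with
  | [] => simp [PySem.Chars.startswith, PySem.Chars.lower, pvIsOn2, List.isPrefixOf]
  | c1 :: r =>
    simp [PySem.Chars.startswith, PySem.Chars.lower, pvIsOn2, List.isPrefixOf]
    tauto

theorem tokenize_ne_nil (c : Char) (rest : List Char) : pvTokenize (c :: rest) ≠ [] := by
  unfold pvTokenize
  split_ifs <;> simp

theorem not_startswith_off_of_digit {d : Char} (hd : PySem.Chars.isdigit d = true)
    (xs : List Char) :
    ¬(xs ≠ [] ∧ PySem.Chars.startswith (PySem.Chars.lower (d :: xs)) ['o','f','f']) := by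
  rintro ⟨-, hpre⟩
  simp [PySem.Chars.startswith, PySem.Chars.lower, List.isPrefixOf] at hpre
  rw [lowerChar_digit hd] at hpre
  obtain rfl := hpre.1.symm
  simp [PySem.Chars.isdigit] at hd

theorem not_startswith_on_of_digit {d : Char} (hd : PySem.Chars.isdigit d = true)
    (xs : List Char) :
    ¬(xs ≠ [] ∧ PySem.Chars.startswith (PySem.Chars.lower (d :: xs)) ['o','n']) := by
  rintro ⟨-, hpre⟩
  simp [PySem.Chars.startswith, PySem.Chars.lower, List.isPrefixOf] at hpre
  rw [lowerChar_digit hd] at hpre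
  obtain rfl := hpre.1.symm
  simp [PySem.Chars.isdigit] at hd

-- digit run is absorbed into current_number
theorem loopA_digits (ds : List Char) (h : ∀ c ∈ ds, PySem.Chars.isdigit c = true) :
    ∀ rest results s a cn,
      onOffLoopA (ds ++ rest) results s a cn = onOffLoopA rest results s a (cn ++ ds) := by
  induction ds with
  | nil => intro rest results s a cn; simp
  | cons d ds' ih =>
    intro rest results s a cn
    have hd : PySem.Chars.isdigit d = true := h d (List.mem_cons_self ..)
    rw [List.cons_append, onOffLoopA.eq_def]
    dsimp only
    rw [if_neg (not_startswith_off_of_digit hd _), if_neg (not_startswith_on_of_digit hd _),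
      if_pos hd, ih (fun c hc => h c (List.mem_cons_of_mem _ hc))]
    simp

-- at a non-digit head, the pending number can be flushed into the sum up front
theorem loopA_flush (c : Char) (rest : List Char) (hc : PySem.Chars.isdigit c = false)
    (results : List Int) (s : Int) (a : Bool) (cn : List Char) :
    onOffLoopA (c :: rest) results s a cn =
      onOffLoopA (c :: rest) results (if cn ≠ [] ∧ a then s + pvIntOfDigits cn else s) a [] := by
  rw [onOffLoopA.eq_def]
  conv_rhs => rw [onOffLoopA.eq_def]
  dsimp only
  rw [hc]
  split_ifs <;> simp_all

theorem runB_off (ts : List PvTok) (r : List Int) (s : Int) (a : Bool) :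
    pvRunB (.off :: ts) r s a = pvRunB ts r s false := by
  cases ts <;> simp [pvRunB, pvRunTok, pvLastIsNum]

theorem runB_on (ts : List PvTok) (r : List Int) (s : Int) (a : Bool) :
    pvRunB (.on :: ts) r s a = pvRunB ts r s true := by
  cases ts <;> simp [pvRunB, pvRunTok, pvLastIsNum]

theorem runB_eq (ts : List PvTok) (r : List Int) (s : Int) (a : Bool) :
    pvRunB (.eq :: ts) r s a = pvRunB ts (r ++ [s]) s a := by
  cases ts <;> simp [pvRunB, pvRunTok, pvLastIsNum]

theorem runB_other (ts : List PvTok) (r : List Int) (s : Int) (a : Bool) :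
    pvRunB (.other :: ts) r s a = pvRunB ts r s a := by
  cases ts <;> simp [pvRunB, pvRunTok, pvLastIsNum]

theorem runB_num (ds : List Char) (ts : List PvTok) (r : List Int) (s : Int) (a : Bool)
    (h : ts ≠ []) :
    pvRunB (.num ds :: ts) r s a = pvRunB ts r (if a then s + pvIntOfDigits ds else s) a := by
  cases ts with
  | nil => exact absurd rfl h
  | cons t ts' => simp [pvRunB, pvRunTok, pvLastIsNum]

theorem runB_num_nil (ds : List Char) (r : List Int) (s : Int) (a : Bool) :
    pvRunB [.num ds] r s a = if a then r ++ [s + pvIntOfDigits ds] else r := by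
  cases a <;> simp [pvRunB, pvRunTok, pvLastIsNum]

theorem main_equiv : ∀ (cs : List Char) (results : List Int) (s : Int) (a : Bool),
    onOffLoopA cs results s a [] = pvRunB (pvTokenize cs) results s a
  | [], r, s, a => by
    simp [onOffLoopA, pvTokenize, pvRunB, pvRunTok, pvLastIsNum]
  | c :: rest, r, s, a => by
    by_cases hoff : pvIsOff3 (c :: rest) = true
    · rw [onOffLoopA.eq_def]
      dsimp only
      rw [if_pos ((off_cond_iff c rest).mpr hoff), pvTokenize.eq_def]
      dsimp only
      rw [if_pos hoff, runB_off]
      have := main_equiv (rest.drop 2) r s false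
      simpa using this
    · by_cases hon : pvIsOn2 (c :: rest) = true
      · rw [onOffLoopA.eq_def]
        dsimp only
        rw [if_neg (fun hx => hoff ((off_cond_iff c rest).mp hx)),
          if_pos ((on_cond_iff c rest).mpr hon), pvTokenize.eq_def]
        dsimp only
        rw [if_neg hoff, if_pos hon, runB_on]
        have := main_equiv (rest.drop 1) r s true
        simpa using this
      · by_cases hc : PySem.Chars.isdigit c = true
        · -- digit run: c :: rest = ds ++ rest'
          have hsplit : c :: rest =
              (c :: rest.takeWhile PySem.Chars.isdigit) ++ rest.dropWhile PySem.Chars.isdigit := by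
            simp [List.takeWhile_append_dropWhile]
          have hds : ∀ x ∈ c :: rest.takeWhile PySem.Chars.isdigit,
              PySem.Chars.isdigit x = true := by
            intro x hx
            rcases List.mem_cons.mp hx with rfl | hx
            · exact hc
            · exact List.mem_takeWhile_imp hx
          rw [pvTokenize.eq_def]
          dsimp only
          rw [if_neg hoff, if_neg hon, if_pos hc]
          conv_lhs => rw [hsplit]
          rw [loopA_digits _ hds]
          cases hrest' : rest.dropWhile PySem.Chars.isdigit with
          | nil =>
            rw [onOffLoopA.eq_def]
            dsimp only
            rw [show pvTokenize [] = ([] : List PvTok) by simp [pvTokenize], runB_num_nil]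
            cases a <;> simp
          | cons c' rs' =>
            have hc' : PySem.Chars.isdigit c' = false := by
              have := List.head?_dropWhile_not PySem.Chars.isdigit rest
              rw [hrest'] at this
              simpa using this
            have hlt : rs'.length < rest.length := by
              have := List.length_dropWhile_le PySem.Chars.isdigit rest
              rw [hrest'] at this
              simpa using Nat.lt_of_lt_of_le (Nat.lt_succ_self _) this
            rw [loopA_flush c' rs' hc', main_equiv (c' :: rs') r _ a,
              runB_num _ _ _ _ _ (tokenize_ne_nil c' rs')]
            simp
        · -- '=' or ordinary character
          rw [onOffLoopA.eq_def]
          dsimp only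
          rw [if_neg (fun hx => hoff ((off_cond_iff c rest).mp hx)),
            if_neg (fun hx => hon ((on_cond_iff c rest).mp hx)),
            if_neg (fun hx => hc hx)]
          rw [pvTokenize.eq_def]
          dsimp only
          rw [if_neg hoff, if_neg hon, if_neg (fun hx => hc hx)]
          by_cases he : c = '='
          · rw [if_pos he, if_pos he, runB_eq, ← main_equiv rest (r ++ [s]) s a]
            simp
          · rw [if_neg he, if_neg he, runB_other, ← main_equiv rest r s a]
            simp
  termination_by cs => cs.length
  decreasing_by
    all_goals simp
    all_goals omega

-- ===== VERDICT (by name: the statement is the Claim_ definition above) =====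
theorem on_off_sum_spec : Claim_equal_on_off_sum := by
  intro text _
  unfold Spec_on_off_sum
  rw [alt_eq_runB]
  exact main_equiv text.toList [] 0 true
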